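-- pv_equiv track=rewrite | github.com/TgCatUB/catuserbot | stdplugins/markdown.py | parse_aesthetics
-- ===== SOURCE A (Python) =====
-- PRINTABLE_ASCII = range(0x21, 0x7f)
--
-- def parse_aesthetics(m):
--     def aesthetify(string):
--         for c in string:
--             c = ord(c)
--             if c in PRINTABLE_ASCII:
--                 c += 0xFF00 - 0x20
--             elif c == ord(" "):
--                 c = 0x3000
--             yield chr(c)
--     return "".join(aesthetify(m[1])), None
-- ===== SOURCE B (Python) =====
-- # B: staged whole-string passes — replace the space first, then one str.replace
-- # pass per printable ASCII character, instead of one per-character branching loop.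
-- PRINTABLE_ASCII = range(0x21, 0x7f)
--
-- def parse_aesthetics(m):
--     s = m[1].replace(" ", "\u3000")
--     for c in PRINTABLE_ASCII:
--         s = s.replace(chr(c), chr(c + 0xFF00 - 0x20))
--     return s, None
-- ===== Notes on version B (the rewrite author's own statement) =====
-- stated objective: alternative
-- what changed: Replaces the single per-character generator with branches by staged whole-string passes: one str.replace for the space and one str.replace pass per printable ASCII code point; passes cannot interfere because every replacement lands outside the ASCII range.
import Mathlib
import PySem

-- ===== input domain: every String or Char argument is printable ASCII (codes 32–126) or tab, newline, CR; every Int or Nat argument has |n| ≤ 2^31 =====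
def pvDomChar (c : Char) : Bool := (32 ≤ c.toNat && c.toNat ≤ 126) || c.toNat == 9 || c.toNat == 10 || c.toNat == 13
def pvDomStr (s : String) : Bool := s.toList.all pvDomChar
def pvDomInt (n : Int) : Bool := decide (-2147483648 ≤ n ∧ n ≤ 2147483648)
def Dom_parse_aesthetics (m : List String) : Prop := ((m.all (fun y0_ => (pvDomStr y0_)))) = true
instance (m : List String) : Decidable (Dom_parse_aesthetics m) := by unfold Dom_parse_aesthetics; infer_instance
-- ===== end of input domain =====

-- B replaces A's one per-character generator loop with branches by staged whole-string
-- str.replace passes (one for the space, one per printable ASCII code point); same cost class.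

-- ===== PORT A =====
-- the inner generator `aesthetify`, char by char, branches in source order
def pvAestifyA : List Char → List Char
  | [] => []
  | ch :: rest =>
    let c := ch.toNat
    let c' := if 0x21 ≤ c ∧ c < 0x7f then c + (0xFF00 - 0x20)
              else if c = 32 then 0x3000 else c
    Char.ofNat c' :: pvAestifyA rest

def parse_aesthetics (m : List String) : String × Option String :=
  match PySem.List.pyGet? m 1 with
  | some s => (String.ofList (pvAestifyA s.toList), none)
  | none => ("", none)   -- unreachable under Pre_ (IndexError in Python)

-- ===== PORT B =====
-- s = m[1].replace(" ", "\u3000"); then for c in range(0x21,0x7f): s = s.replace(chr(c), chr(c+0xFEE0))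
def pvStagedB (s : List Char) : List Char :=
  (PySem.List.pyRange 0x21 0x7f 1).foldl
    (fun t c => PySem.Chars.replace t [Char.ofNat c.toNat] [Char.ofNat (c.toNat + (0xFF00 - 0x20))])
    (PySem.Chars.replace s [' '] ['\u3000'])

def parse_aesthetics_alt (m : List String) : String × Option String :=
  match PySem.List.pyGet? m 1 with
  | some s => (String.ofList (pvStagedB s.toList), none)
  | none => ("", none)

-- ===== PRECONDITION & SPEC =====
-- Python raises IndexError on m[1] when the list has fewer than two elements
def Pre_parse_aesthetics (m : List String) : Prop := 2 ≤ m.length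
instance (m : List String) : Decidable (Pre_parse_aesthetics m) := by unfold Pre_parse_aesthetics; infer_instance
def pvWitness_parse_aesthetics : List String := ["x", "Hi there!"]

def Spec_parse_aesthetics (m : List String) (out : String × Option String) : Prop := out = parse_aesthetics_alt m
instance (m : List String) (out : String × Option String) : Decidable (Spec_parse_aesthetics m out) := by unfold Spec_parse_aesthetics; infer_instance

-- ===== CLAIM (what is proved, stated in full; the proofs are below) =====
def Claim_equal_parse_aesthetics : Prop := ∀ (m : List String), Dom_parse_aesthetics m → Pre_parse_aesthetics m → Spec_parse_aesthetics m (parse_aesthetics m)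

-- ===== LEMMAS AND PROOFS =====

-- single-character str.replace is a map over the characters
theorem pv_replace_go_single (a b : Char) :
    ∀ (l : List Char) (fuel : Nat) (acc : List Char), l.length ≤ fuel →
      PySem.Chars.replace.go [a] [b] fuel l acc
        = acc.reverse ++ l.map (fun ch => if ch = a then b else ch) := by
  intro l
  induction l with
  | nil =>
    intro fuel acc _
    cases fuel <;> simp [PySem.Chars.replace.go]
  | cons c t ih =>
    intro fuel acc hle
    cases fuel with
    | zero => simp at hle
    | succ n =>
      simp only [PySem.Chars.replace.go]
      by_cases h : c = a
      · subst h
        simp only [List.isPrefixOf, beq_self_eq_true, Bool.true_and,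
          if_pos]
        simp only [List.length_cons, List.length_nil, List.drop]
        rw [ih n ([b].reverse ++ acc) (by simpa using Nat.le_of_succ_le_succ hle)]
        simp
      · have hp : [a].isPrefixOf (c :: t) = false := by
          simp [List.isPrefixOf]
          exact fun hc => absurd hc.symm h
        rw [hp]
        simp only [Bool.false_eq_true, if_false]
        rw [ih n (c :: acc) (Nat.le_of_succ_le_succ hle)]
        simp [h]

theorem pv_replace_single (a b : Char) (s : List Char) :
    PySem.Chars.replace s [a] [b] = s.map (fun ch => if ch = a then b else ch) := by
  simp only [PySem.Chars.replace, List.isEmpty_cons, Bool.false_eq_true, if_false]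
  simpa using pv_replace_go_single a b s s.length [] (le_refl _)

-- a fold of maps is a map of the folded per-character function
theorem pv_foldl_map {α : Type} (ps : List α) (step : α → Char → Char) :
    ∀ (s : List Char),
      ps.foldl (fun t p => t.map (fun ch => step p ch)) s
        = s.map (fun ch => ps.foldl (fun x p => step p x) ch) := by
  induction ps with
  | nil => intro s; simp
  | cons p rest ih =>
    intro s
    simp only [List.foldl_cons]
    rw [ih (s.map (fun ch => step p ch)), List.map_map]
    rfl

-- per-character agreement of the two pipelines on every domain code point
set_option maxRecDepth 8192 in
theorem pv_char_agree : ∀ n : Nat, n < 127 →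
    Char.ofNat (if 0x21 ≤ n ∧ n < 0x7f then n + (0xFF00 - 0x20)
                else if n = 32 then 0x3000 else n)
      = (PySem.List.pyRange 0x21 0x7f 1).foldl
          (fun x c => if x = Char.ofNat c.toNat then Char.ofNat (c.toNat + (0xFF00 - 0x20)) else x)
          (if Char.ofNat n = ' ' then '\u3000' else Char.ofNat n) := by decide

theorem pv_staged_eq_aestify (s : List Char) (h : s.all pvDomChar = true) :
    pvStagedB s = pvAestifyA s := by
  unfold pvStagedB
  rw [pv_replace_single]
  have hfold := pv_foldl_map (PySem.List.pyRange 0x21 0x7f 1)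
    (fun c x => if x = Char.ofNat c.toNat then Char.ofNat (c.toNat + (0xFF00 - 0x20)) else x)
  simp only [pv_replace_single] at hfold ⊢
  rw [hfold]
  induction s with
  | nil => rfl
  | cons ch rest ih =>
    simp only [List.all_cons, Bool.and_eq_true] at h
    have hc : ch.toNat < 127 := by
      have := h.1
      simp only [pvDomChar, Bool.or_eq_true, Bool.and_eq_true, decide_eq_true_eq,
        beq_iff_eq] at this
      omega
    simp only [List.map_cons, pvAestifyA]
    refine congrArg₂ _ ?_ (ih h.2)
    have := pv_char_agree ch.toNat hc
    rw [Char.ofNat_toNat ch] at this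
    exact this.symm

-- ===== VERDICT (by name: the statement is the Claim_ definition above) =====
theorem parse_aesthetics_spec : Claim_equal_parse_aesthetics := by
  intro m hdom hpre
  unfold Spec_parse_aesthetics parse_aesthetics parse_aesthetics_alt
  have hget : ∃ s, PySem.List.pyGet? m 1 = some s ∧ s ∈ m := by
    match m, hpre with
    | a :: b :: rest, _ => exact ⟨b, by simp [PySem.List.pyGet?, PySem.List.pyIdx?], by simp⟩
  obtain ⟨s, hs, hmem⟩ := hget
  rw [hs]
  dsimp only
  have hds : pvDomStr s = true := by
    unfold Dom_parse_aesthetics at hdom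
    rw [List.all_eq_true] at hdom
    exact hdom s hmem
  rw [pv_staged_eq_aestify s.toList hds]
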